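-- pv_equiv track=rewrite | github.com/gdcc/easyDataverse | easyDataverse/connect.py | find_common_name_part
-- ===== SOURCE A (Python) =====
-- from typing import List, Tuple, Union, Type, Optional, Dict, Callable
--
-- def find_common_name_part(names: List[str]):
--     """Finds a common name part to remove this across primitives and compounds
--
--     Looks better!!!
--     """
--
--     if len(names) <= 1:
--         return ""
--
--     diff = False
--     common_start = []
--
--     while diff is False:
--         try:
--             current_char_set = {name.split("_")[len(common_start)] for name in names}
--         except IndexError:
--             return "_".join(common_start) + "_"
--
--         if len(current_char_set) == 1:
--             common_start += list(current_char_set)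
--         else:
--             diff = True
--
--     if len(common_start) == 0:
--         return ""
--
--     return "_".join(common_start) + "_"
-- ===== SOURCE B (Python) =====
-- def _lcp(xs, ys):
--     """Longest common prefix of two token lists."""
--     common = []
--     for x, y in zip(xs, ys):
--         if x != y:
--             break
--         common.append(x)
--     return common
--
-- def find_common_name_part(names):
--     if len(names) <= 1:
--         return ""
--     token_lists = [name.split("_") for name in names]
--     common = token_lists[0]
--     for toks in token_lists[1:]:
--         common = _lcp(common, toks)
--     if not common:
--         return ""
--     return "_".join(common) + "_"
-- ===== Notes on version B (the rewrite author's own statement) =====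
-- stated objective: simpler
-- what changed: Replaces A's column-wise while-loop that builds a set of the i-th '_'-token of every name on each iteration (using IndexError for control flow) by a single left fold of a pairwise longest-common-prefix over the token lists.
import Mathlib
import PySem

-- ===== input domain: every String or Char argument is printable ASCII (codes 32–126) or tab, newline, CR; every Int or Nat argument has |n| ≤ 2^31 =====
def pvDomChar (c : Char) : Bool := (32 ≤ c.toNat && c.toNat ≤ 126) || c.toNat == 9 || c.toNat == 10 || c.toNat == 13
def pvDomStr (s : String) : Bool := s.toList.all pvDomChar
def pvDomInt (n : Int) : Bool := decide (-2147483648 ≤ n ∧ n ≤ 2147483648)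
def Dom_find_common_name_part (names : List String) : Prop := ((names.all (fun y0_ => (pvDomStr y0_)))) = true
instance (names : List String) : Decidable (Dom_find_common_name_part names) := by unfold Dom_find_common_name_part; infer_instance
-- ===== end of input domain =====

-- B replaces A's column-wise set scan (with IndexError control flow) by a left fold of a
-- pairwise longest-common-prefix over the token lists; objective: simpler, same cost.

-- name.split("_") (the separator is the non-empty literal "_", so split? is always some)
def pvSplit (name : String) : List String := (PySem.Str.split? name "_").getD []

-- ===== PORT A =====
-- the values name.split("_")[i] for name in names, before set formation; none = IndexError
def pvColumn (tokss : List (List String)) (i : Nat) : Option (List String) :=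
  match tokss with
  | [] => some []
  | t :: rest =>
    match PySem.List.pyGet? t (i : Int) with
    | none => none
    | some v => (pvColumn rest i).map (fun vs => v :: vs)

-- the 'while diff is False' loop; the fuel only makes the recursion total and is never exhausted
def pvLoopA (tokss : List (List String)) (common : List String) : Nat → String
  | 0 => ""
  | fuel + 1 =>
    match pvColumn tokss common.length with
    | none => PySem.Str.join "_" common ++ "_"
    | some vals =>
      let s : PySem.Set String := PySem.Set.ofList vals
      if s.length == 1 then
        pvLoopA tokss (common ++ s) fuel
      else if common.length == 0 then "" else PySem.Str.join "_" common ++ "_"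

def find_common_name_part (names : List String) : String :=
  if names.length ≤ 1 then ""
  else
    let tokss := names.map pvSplit
    pvLoopA tokss [] ((tokss.map List.length).sum + 1)

-- ===== PORT B =====
-- _lcp(xs, ys): walk the zip collecting equal tokens, stop at the first mismatch
def pvLcp : List String → List String → List String
  | x :: xs, y :: ys => if x = y then x :: pvLcp xs ys else []
  | _, _ => []

-- token_lists[0] is ported as headD [] (token_lists is non-empty whenever it is read)
def find_common_name_part_alt (names : List String) : String :=
  if names.length ≤ 1 then ""
  else
    let token_lists := names.map pvSplit
    let common := token_lists.tail.foldl pvLcp (token_lists.headD [])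
    if common.isEmpty then "" else PySem.Str.join "_" common ++ "_"

-- ===== PRECONDITION & SPEC =====
def Spec_find_common_name_part (names : List String) (out : String) : Prop := out = find_common_name_part_alt names
instance (names : List String) (out : String) : Decidable (Spec_find_common_name_part names out) := by unfold Spec_find_common_name_part; infer_instance

-- ===== CLAIM (what is proved, stated in full; the proofs are below) =====
def Claim_equal_find_common_name_part : Prop := ∀ (names : List String), Dom_find_common_name_part names → Spec_find_common_name_part names (find_common_name_part names)

-- ===== LEMMAS AND PROOFS =====

lemma pvLcp_prefix_left (a b : List String) : pvLcp a b <+: a := by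
  induction a generalizing b with
  | nil => cases b <;> simp [pvLcp]
  | cons x xs ih =>
    cases b with
    | nil => simp [pvLcp]
    | cons y ys =>
      simp only [pvLcp]
      split_ifs with h
      · exact List.cons_prefix_cons.mpr ⟨rfl, ih ys⟩
      · simp

lemma pvLcp_prefix_right (a b : List String) : pvLcp a b <+: b := by
  induction a generalizing b with
  | nil => cases b <;> simp [pvLcp]
  | cons x xs ih =>
    cases b with
    | nil => simp [pvLcp]
    | cons y ys =>
      simp only [pvLcp]
      split_ifs with h
      · exact List.cons_prefix_cons.mpr ⟨h, ih ys⟩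
      · simp

lemma prefix_pvLcp {p a b : List String} (ha : p <+: a) (hb : p <+: b) : p <+: pvLcp a b := by
  induction p generalizing a b with
  | nil => simp
  | cons z zs ih =>
    cases a with
    | nil => simp at ha
    | cons x xs =>
      cases b with
      | nil => simp at hb
      | cons y ys =>
        rw [List.cons_prefix_cons] at ha hb
        obtain ⟨rfl, ha2⟩ := ha
        obtain ⟨rfl, hb2⟩ := hb
        simp only [pvLcp]
        exact List.cons_prefix_cons.mpr ⟨rfl, ih ha2 hb2⟩

lemma foldl_pvLcp_prefix_acc (ts : List (List String)) (acc : List String) :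
    ts.foldl pvLcp acc <+: acc := by
  induction ts generalizing acc with
  | nil => simp
  | cons t ts ih => exact (ih (pvLcp acc t)).trans (pvLcp_prefix_left acc t)

lemma foldl_pvLcp_prefix_mem {ts : List (List String)} (acc : List String) {t : List String}
    (ht : t ∈ ts) : ts.foldl pvLcp acc <+: t := by
  induction ts generalizing acc with
  | nil => simp at ht
  | cons u us ih =>
    rcases List.mem_cons.mp ht with rfl | h
    · exact (foldl_pvLcp_prefix_acc us (pvLcp acc t)).trans (pvLcp_prefix_right acc t)
    · exact ih (pvLcp acc u) h

lemma prefix_foldl_pvLcp {p : List String} {ts : List (List String)} {acc : List String}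
    (hacc : p <+: acc) (h : ∀ t ∈ ts, p <+: t) : p <+: ts.foldl pvLcp acc := by
  induction ts generalizing acc with
  | nil => simpa using hacc
  | cons u us ih =>
    exact ih (prefix_pvLcp hacc (h u (by simp))) (fun t ht => h t (List.mem_cons_of_mem u ht))

lemma pvColumn_eq_none {tokss : List (List String)} {i : Nat}
    (h : ∃ t ∈ tokss, t.length ≤ i) : pvColumn tokss i = none := by
  induction tokss with
  | nil => simp at h
  | cons t rest ih =>
    obtain ⟨u, hu, hlen⟩ := h
    rcases List.mem_cons.mp hu with rfl | hmem
    · simp [pvColumn, PySem.List.pyGet?_natCast, List.getElem?_eq_none hlen]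
    · simp only [pvColumn]
      rw [ih ⟨u, hmem, hlen⟩]
      cases PySem.List.pyGet? t (i : Int) <;> simp

lemma pvColumn_eq_some {tokss : List (List String)} {i : Nat}
    (h : ∀ t ∈ tokss, i < t.length) :
    pvColumn tokss i = some (tokss.map (fun t => t.getD i "")) := by
  induction tokss with
  | nil => simp [pvColumn]
  | cons t rest ih =>
    have hi := h t (by simp)
    simp only [pvColumn, PySem.List.pyGet?_natCast, List.getElem?_eq_getElem hi]
    rw [ih (fun u hu => h u (List.mem_cons_of_mem t hu))]
    simp [List.getD, List.getElem?_eq_getElem hi]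

lemma ofList_const {vals : List String} {c : String} (h : ∀ x ∈ vals, x = c) (hne : vals ≠ []) :
    PySem.Set.ofList vals = [c] := by
  have aux : ∀ vs : List String, (∀ x ∈ vs, x = c) → List.foldl PySem.Set.add [c] vs = [c] := by
    intro vs
    induction vs with
    | nil => simp
    | cons v vs ih =>
      intro hv
      have : v = c := hv v (by simp)
      subst this
      simpa [PySem.Set.add] using ih (fun x hx => hv x (by simp [hx]))
  cases vals with
  | nil => simp at hne
  | cons v vs =>
    have : v = c := h v (by simp)
    subst this
    rw [PySem.Set.ofList_eq_foldl]
    simpa [PySem.Set.add, PySem.Set.empty] using aux vs (fun x hx => h x (by simp [hx]))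

lemma splitOn_go_len (sep : List Char) (fuel : Nat) (l cur : List Char) (acc : List (List Char)) :
    acc.length < (PySem.Chars.splitOn.go sep fuel l cur acc).length := by
  induction fuel generalizing l cur acc with
  | zero => simp [PySem.Chars.splitOn.go]
  | succ f ih =>
    cases l with
    | nil => simp [PySem.Chars.splitOn.go]
    | cons c rest =>
      rw [PySem.Chars.splitOn.go]
      split_ifs with h
      · calc acc.length < (cur.reverse :: acc).length := by simp
          _ < _ := ih _ _ _
      · exact ih _ _ _

lemma pvSplit_ne_nil (name : String) : pvSplit name ≠ [] := by
  have h := splitOn_go_len ['_'] (name.length + 1) name.toList [] []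
  simp [pvSplit, PySem.Str.split?, PySem.Chars.split?, PySem.Chars.splitOn]
  intro hnil
  rw [hnil] at h
  simp at h

lemma L_prefix_mem (tokss : List (List String)) {t : List String}
    (ht : t ∈ tokss) : tokss.tail.foldl pvLcp (tokss.headD []) <+: t := by
  cases tokss with
  | nil => simp at ht
  | cons u us =>
    simp only [List.tail_cons, List.headD_cons]
    rcases List.mem_cons.mp ht with rfl | h
    · exact foldl_pvLcp_prefix_acc us t
    · exact foldl_pvLcp_prefix_mem u h

lemma prefix_L (tokss : List (List String)) (hne : tokss ≠ []) {p : List String}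
    (h : ∀ t ∈ tokss, p <+: t) : p <+: tokss.tail.foldl pvLcp (tokss.headD []) := by
  cases tokss with
  | nil => exact absurd rfl hne
  | cons u us =>
    simp only [List.tail_cons, List.headD_cons]
    exact prefix_foldl_pvLcp (h u (by simp)) (fun t ht => h t (List.mem_cons_of_mem u ht))

lemma pvLoopA_eq (tokss : List (List String)) (hne : tokss ≠ [])
    (hnz : ∀ t ∈ tokss, t ≠ [])
    (L : List String) (hL : L = tokss.tail.foldl pvLcp (tokss.headD []))
    (fuel : Nat) (common : List String) (hpre : common <+: L)
    (hfuel : L.length - common.length < fuel) :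
    pvLoopA tokss common fuel = if L.isEmpty then "" else PySem.Str.join "_" L ++ "_" := by
  induction fuel generalizing common with
  | zero => omega
  | succ f ih =>
    have hkL : common.length ≤ L.length := hpre.length_le
    by_cases hall : ∀ t ∈ tokss, common.length < t.length
    · -- no IndexError this round
      rw [pvLoopA, pvColumn_eq_some hall]
      dsimp only
      by_cases hlt : common.length < L.length
      · -- every token in this column equals the next token of L
        obtain ⟨rest, rfl⟩ := hpre
        obtain ⟨r, rs, rfl⟩ : ∃ r rs, rest = r :: rs := by
          cases rest with
          | nil => simp at hlt
          | cons r rs => exact ⟨r, rs, rfl⟩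
        have hc : ∀ x ∈ tokss.map (fun t => t.getD common.length ""), x = r := by
          intro x hx
          obtain ⟨t, ht, rfl⟩ := List.mem_map.mp hx
          have hpt : common ++ r :: rs <+: t := hL ▸ L_prefix_mem tokss ht
          obtain ⟨u, rfl⟩ := hpt
          simp [List.getD, List.getElem?_append_right (Nat.le_refl common.length)]
        have hvne : tokss.map (fun t => t.getD common.length "") ≠ [] := by
          simpa using hne
        rw [ofList_const hc hvne]
        rw [if_pos (by simp)]
        have := ih (common ++ [r]) (by simp) (by simp at hfuel ⊢; omega)
        simpa using this
      · -- common is already all of L; the set cannot be a singleton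
        have hcL : common = L := hpre.eq_of_length (by omega)
        subst hcL
        have hone : ¬ ((PySem.Set.ofList (tokss.map (fun t => t.getD common.length ""))).length == 1) = true := by
          intro hone
          set s := PySem.Set.ofList (tokss.map (fun t => t.getD common.length "")) with hs
          have hslen : s.length = 1 := by simpa using hone
          obtain ⟨c, hcs⟩ : ∃ c, s = [c] := by
            cases hx : s with
            | nil => rw [hx] at hslen; simp at hslen
            | cons a as =>
              rw [hx] at hslen
              cases as with
              | nil => exact ⟨a, rfl⟩
              | cons b bs => simp at hslen
          have hext : ∀ t ∈ tokss, common ++ [c] <+: t := by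
            intro t ht
            have hpt : common <+: t := hL ▸ L_prefix_mem tokss ht
            obtain ⟨u, rfl⟩ := hpt
            have hmem : (common ++ u).getD common.length "" ∈ s :=
              hs ▸ (PySem.Set.mem_ofList _ _).mpr (List.mem_map.mpr ⟨common ++ u, ht, rfl⟩)
            rw [hcs] at hmem
            have hlt' := hall _ ht
            cases u with
            | nil => simp at hlt'
            | cons w ws =>
              have : w = c := by
                have := List.mem_singleton.mp hmem
                simpa [List.getD, List.getElem?_append_right (Nat.le_refl common.length)] using this
              subst this
              exact ⟨ws, by simp⟩
          have hlong := prefix_L tokss hne hext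
          rw [← hL] at hlong
          have := hlong.length_le
          simp at this
        rw [if_neg hone]
        cases common with
        | nil => simp
        | cons a as => simp
    · -- IndexError: some token list has run out, so common = L and L ≠ []
      push_neg at hall
      obtain ⟨t, ht, hle⟩ := hall
      rw [pvLoopA, pvColumn_eq_none ⟨t, ht, hle⟩]
      have hpt : L <+: t := hL ▸ L_prefix_mem tokss ht
      have h1 : L.length ≤ t.length := hpt.length_le
      have hcL : common = L := hpre.eq_of_length (by omega)
      subst hcL
      have htne : t ≠ [] := hnz t ht
      have htlen : 0 < t.length := List.length_pos_of_ne_nil htne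
      have hLne : common.isEmpty = false := by
        cases common with
        | nil => simp at hle; exact absurd hle htne
        | cons a as => simp
      rw [hLne]
      simp

-- ===== VERDICT (by name: the statement is the Claim_ definition above) =====
theorem find_common_name_part_spec : Claim_equal_find_common_name_part := by
  unfold Claim_equal_find_common_name_part Spec_find_common_name_part
  intro names _
  unfold find_common_name_part find_common_name_part_alt
  by_cases hle : names.length ≤ 1
  · rw [if_pos hle, if_pos hle]
  · rw [if_neg hle, if_neg hle]
    have hne : names.map pvSplit ≠ [] := by
      simp only [ne_eq, List.map_eq_nil_iff]
      intro h; subst h; simp at hle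
    obtain ⟨u, us, hn⟩ := List.exists_cons_of_ne_nil hne
    have hnz : ∀ t ∈ names.map pvSplit, t ≠ [] := by
      intro t ht
      obtain ⟨n, _, rfl⟩ := List.mem_map.mp ht
      exact pvSplit_ne_nil n
    have hLpre : (names.map pvSplit).tail.foldl pvLcp ((names.map pvSplit).headD []) <+: u :=
      L_prefix_mem (names.map pvSplit) (by rw [hn]; simp)
    have hsum : ((names.map pvSplit).map List.length).sum = u.length + ((us.map List.length).sum) := by
      rw [hn]; simp
    have hfuel : ((names.map pvSplit).tail.foldl pvLcp ((names.map pvSplit).headD [])).length -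
        ([] : List String).length < ((names.map pvSplit).map List.length).sum + 1 := by
      have h2 := hLpre.length_le
      rw [hsum]
      simp only [List.length_nil, Nat.sub_zero]
      omega
    exact pvLoopA_eq (names.map pvSplit) hne hnz _ rfl _ [] (by simp) hfuel
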